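-- pv_equiv track=rewrite | github.com/bridgecrewio/checkov | checkov/common/output/ai.py | _parse_completion_response
-- ===== SOURCE A (Python) =====
-- def _parse_completion_response(completion_content: str) -> list[str]:
--     result = []
--
--     if completion_content:
--         result.append("The following text is AI generated and should be treated as a suggestion.")
--         result.append("")
--
--     in_code_block = False
--     for line in completion_content.splitlines():
--         if "```" in line:
--             if in_code_block:
--                 in_code_block = False
--             else:
--                 in_code_block = True
--             continue
--         if in_code_block:
--             result.append(line)
--         elif not line:
--             result.append(line)
--         else:
--             result.extend(
--                 sentence if sentence.endswith((".", ":")) else f"{sentence}."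
--                 for sentence in line.strip().split(". ")
--             )
--
--     return result
-- ===== SOURCE B (Python) =====
-- def _parse_completion_response(completion_content: str) -> list[str]:
--     # Pass 1: split lines into segments at every fence line; even segments are prose, odd ones code.
--     segments = [[]]
--     for line in completion_content.splitlines():
--         if "```" in line:
--             segments.append([])
--         else:
--             segments[-1].append(line)
--
--     # Pass 2: emit the header, then each segment according to its parity.
--     result = ["The following text is AI generated and should be treated as a suggestion.", ""] if completion_content else []
--     prose = True
--     for seg in segments:
--         if prose:
--             for line in seg:
--                 if line:
--                     result.extend(s if s.endswith((".", ":")) else s + "." for s in line.strip().split(". "))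
--                 else:
--                     result.append(line)
--         else:
--             result.extend(seg)
--         prose = not prose
--     return result
-- ===== Notes on version B (the rewrite author's own statement) =====
-- stated objective: alternative
-- what changed: B replaces A's single pass with a per-line toggled in_code_block flag by a two-phase pipeline: first split the lines into fence-delimited segments, then emit segments whole by parity (even = prose processing, odd = verbatim code).
import Mathlib
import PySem

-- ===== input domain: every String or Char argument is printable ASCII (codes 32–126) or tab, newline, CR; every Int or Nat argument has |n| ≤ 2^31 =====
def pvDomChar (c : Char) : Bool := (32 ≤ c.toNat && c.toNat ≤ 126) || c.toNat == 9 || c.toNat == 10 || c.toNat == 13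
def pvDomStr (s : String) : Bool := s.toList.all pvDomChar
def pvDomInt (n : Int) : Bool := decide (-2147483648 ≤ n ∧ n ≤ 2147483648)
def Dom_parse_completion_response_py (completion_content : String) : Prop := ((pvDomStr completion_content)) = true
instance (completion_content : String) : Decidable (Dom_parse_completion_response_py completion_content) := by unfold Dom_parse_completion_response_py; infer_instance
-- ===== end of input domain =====

-- B restructures A's one-pass fence toggle into a two-phase pipeline (segment split, then parity emission); alternative decomposition, same cost.

-- shared sentence expression: the generator 'sentence if sentence.endswith((".",":")) else f"{sentence}."
--                              for sentence in line.strip().split(". ")' (identical text in Source A and Source B)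
def pvSent (line : String) : List String :=
  -- split? is none only for sep = ""; the separator here is the literal ". ", so getD is never taken
  ((PySem.Str.split? (PySem.Str.strip line) ". ").getD []).map
    (fun s => if PySem.Str.endswith s "." || PySem.Str.endswith s ":" then s else s ++ ".")

-- ===== PORT A =====
-- loop body of A's single for-loop, state = (in_code_block, result)
def pvStepA (st : Bool × List String) (line : String) : Bool × List String :=
  if PySem.Str.isIn "```" line then
    (if st.1 then (false, st.2) else (true, st.2))
  else if st.1 then (st.1, st.2 ++ [line])
  else if line = "" then (st.1, st.2 ++ [line])
  else (st.1, st.2 ++ pvSent line)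

def parse_completion_response_py (completion_content : String) : List String :=
  let result : List String :=
    if completion_content ≠ "" then
      ["The following text is AI generated and should be treated as a suggestion.", ""]
    else []
  ((PySem.Str.splitlines completion_content).foldl pvStepA (false, result)).2

-- ===== PORT B =====
-- pass 1 loop body: state = (finished segments, current segment)
def pvStepSeg (p : List (List String) × List String) (line : String) :
    List (List String) × List String :=
  if PySem.Str.isIn "```" line then (p.1 ++ [p.2], []) else (p.1, p.2 ++ [line])

-- inner prose loop body of pass 2
def pvStepProse (a : List String) (line : String) : List String :=
  if line ≠ "" then a ++ pvSent line else a ++ [line]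

-- pass 2 loop body: state = (result, prose flag)
def pvStepProc (st : List String × Bool) (seg : List String) : List String × Bool :=
  ((if st.2 then seg.foldl pvStepProse st.1 else st.1 ++ seg), !st.2)

def parse_completion_response_py_alt (completion_content : String) : List String :=
  let p := (PySem.Str.splitlines completion_content).foldl pvStepSeg ([], [])
  let segments := p.1 ++ [p.2]
  let result : List String :=
    if completion_content ≠ "" then
      ["The following text is AI generated and should be treated as a suggestion.", ""]
    else []
  (segments.foldl pvStepProc (result, true)).1

-- ===== PRECONDITION & SPEC =====
def Spec_parse_completion_response_py (completion_content : String) (out : List String) : Prop := out = parse_completion_response_py_alt completion_content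
instance (completion_content : String) (out : List String) : Decidable (Spec_parse_completion_response_py completion_content out) := by unfold Spec_parse_completion_response_py; infer_instance

-- ===== CLAIM (what is proved, stated in full; the proofs are below) =====
def Claim_equal_parse_completion_response_py : Prop := ∀ (completion_content : String), Dom_parse_completion_response_py completion_content → Spec_parse_completion_response_py completion_content (parse_completion_response_py completion_content)

-- ===== LEMMAS AND PROOFS =====

-- what a single non-fence line contributes, given the code-block flag
def pvItem (icb : Bool) (line : String) : List String :=
  if icb then [line] else if line = "" then [line] else pvSent line

-- reference semantics of A's loop
def pvG : Bool → List String → List String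
  | _, [] => []
  | icb, l :: ls =>
    if PySem.Str.isIn "```" l then pvG (!icb) ls else pvItem icb l ++ pvG icb ls

-- recursive form of B's pass 1 result
def pvSegsOf : List String → List String → List (List String)
  | cur, [] => [cur]
  | cur, l :: ls =>
    if PySem.Str.isIn "```" l then cur :: pvSegsOf [] ls else pvSegsOf (cur ++ [l]) ls

-- one segment's contribution in pass 2
def pvProc1 (prose : Bool) (seg : List String) : List String :=
  if prose then seg.flatMap (pvItem false) else seg

-- recursive form of B's pass 2
def pvH : Bool → List (List String) → List String
  | _, [] => []
  | prose, s :: ss => pvProc1 prose s ++ pvH (!prose) ss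

lemma foldA_eq (ls : List String) : ∀ (icb : Bool) (res : List String),
    (ls.foldl pvStepA (icb, res)).2 = res ++ pvG icb ls := by
  induction ls with
  | nil => intro icb res; simp [pvG]
  | cons l ls ih =>
    intro icb res
    by_cases hf : PySem.Str.isIn "```" l = true <;> simp at hf
    · cases icb <;> simp [pvStepA, pvG, hf, ih]
    · cases icb <;>
        · by_cases hl : l = ""
          · have h0 : PySem.Chars.isIn ['`', '`', '`'] ([] : List Char) = false := by decide
            simp [pvStepA, pvG, pvItem, hl, h0, ih]
          · simp [pvStepA, pvG, pvItem, hf, hl, ih]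

lemma foldProse_eq (seg : List String) : ∀ (a : List String),
    seg.foldl pvStepProse a = a ++ seg.flatMap (pvItem false) := by
  induction seg with
  | nil => intro a; simp
  | cons l ls ih =>
    intro a
    by_cases hl : l = "" <;> simp [pvStepProse, pvItem, hl, ih]

lemma foldProc_eq (segs : List (List String)) : ∀ (prose : Bool) (acc : List String),
    (segs.foldl pvStepProc (acc, prose)).1 = acc ++ pvH prose segs := by
  induction segs with
  | nil => intro prose acc; simp [pvH]
  | cons s ss ih =>
    intro prose acc
    cases prose <;> simp [pvStepProc, pvH, pvProc1, foldProse_eq, ih]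

lemma foldSeg_eq (ls : List String) : ∀ (segs : List (List String)) (cur : List String),
    (ls.foldl pvStepSeg (segs, cur)).1 ++ [(ls.foldl pvStepSeg (segs, cur)).2]
      = segs ++ pvSegsOf cur ls := by
  induction ls with
  | nil => intro segs cur; simp [pvSegsOf]
  | cons l ls ih =>
    intro segs cur
    by_cases hf : PySem.Str.isIn "```" l = true <;> simp at hf <;>
      simp [pvStepSeg, pvSegsOf, hf, ih]

lemma pvH_segsOf (ls : List String) : ∀ (prose : Bool) (cur : List String),
    pvH prose (pvSegsOf cur ls) = pvProc1 prose cur ++ pvG (!prose) ls := by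
  induction ls with
  | nil => intro prose cur; simp [pvSegsOf, pvH, pvG]
  | cons l ls ih =>
    intro prose cur
    by_cases hf : PySem.Str.isIn "```" l = true <;> simp at hf
    · simp [pvSegsOf, pvH, pvG, hf, ih, pvProc1]
    · have hcur : pvProc1 prose (cur ++ [l]) = pvProc1 prose cur ++ pvItem (!prose) l := by
        cases prose <;> simp [pvProc1, pvItem]
      simp [pvSegsOf, pvG, hf, ih, hcur]

-- ===== VERDICT (by name: the statement is the Claim_ definition above) =====
theorem parse_completion_response_py_spec : Claim_equal_parse_completion_response_py := by
  intro cc _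
  unfold Spec_parse_completion_response_py parse_completion_response_py parse_completion_response_py_alt
  have hseg := foldSeg_eq (PySem.Str.splitlines cc) [] []
  simp only [List.nil_append] at hseg
  simp [foldA_eq, foldProc_eq, hseg, pvH_segsOf, pvProc1]
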